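-- pv_equiv track=rewrite | github.com/Mythmaker28/ising-life-lab | isinglab/meta_learner/selector.py | _diversity_sampling
-- ===== SOURCE A (Python) =====
-- from typing import Dict, List, Tuple
--
-- def _diversity_sampling(pool: List[Dict], batch_size: int) -> List[Dict]:
--     if batch_size <= 0:
--         return []
--     buckets: Dict[int, List[Dict]] = {}
--     for cand in pool:
--         born_count = len(cand.get('born', []))
--         buckets.setdefault(born_count, []).append(cand)
--     selected: List[Dict] = []
--     while len(selected) < batch_size and buckets:
--         for born_count in sorted(buckets.keys()):
--             if buckets[born_count]:
--                 selected.append(buckets[born_count].pop(0))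
--                 if len(selected) >= batch_size:
--                     break
--             else:
--                 buckets.pop(born_count, None)
--     return selected
-- ===== SOURCE B (Python) =====
-- from typing import Dict, List
--
--
-- def _diversity_sampling(pool: List[Dict], batch_size: int) -> List[Dict]:
--     if batch_size <= 0:
--         return []
--     # One pass: tag each candidate with (rank, born_count), where rank is the
--     # number of earlier candidates sharing its born_count.
--     seen: Dict[int, int] = {}
--     decorated = []
--     for cand in pool:
--         born_count = len(cand.get('born', []))
--         rank = seen.get(born_count, 0)
--         seen[born_count] = rank + 1
--         decorated.append((rank, born_count, cand))
--     # Round-robin emission order is exactly ascending (rank, born_count).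
--     decorated.sort(key=lambda t: (t[0], t[1]))
--     return [cand for _, _, cand in decorated[:batch_size]]
-- ===== Notes on version B (the rewrite author's own statement) =====
-- stated objective: alternative
-- what changed: Replaces the mutating bucket dict with while/pop(0) round-robin loop by a single decoration pass (rank = count of earlier candidates with the same born_count) followed by one stable sort on the key (rank, born_count) and a slice.
import Mathlib
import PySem

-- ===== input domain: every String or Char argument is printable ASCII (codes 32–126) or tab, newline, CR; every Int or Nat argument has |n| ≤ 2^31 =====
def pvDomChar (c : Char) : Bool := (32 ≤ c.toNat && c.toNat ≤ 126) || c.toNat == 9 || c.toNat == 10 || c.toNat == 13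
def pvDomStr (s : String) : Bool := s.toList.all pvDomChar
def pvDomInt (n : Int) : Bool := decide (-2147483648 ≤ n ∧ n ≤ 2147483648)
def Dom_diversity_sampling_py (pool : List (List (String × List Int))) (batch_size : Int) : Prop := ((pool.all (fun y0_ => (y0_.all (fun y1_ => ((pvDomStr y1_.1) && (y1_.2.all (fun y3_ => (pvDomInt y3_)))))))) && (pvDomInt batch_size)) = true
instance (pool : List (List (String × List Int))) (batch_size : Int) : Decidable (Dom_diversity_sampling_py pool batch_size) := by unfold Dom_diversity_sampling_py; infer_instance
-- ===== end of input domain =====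

-- B replaces A's mutating bucket-dict round-robin (while / pop(0)) by one decoration pass
-- (rank = number of earlier candidates with the same born_count) plus a single stable sort
-- on (rank, born_count); equal return value, neither mutates its arguments.

-- ===== PORT A =====
-- born_count = len(cand.get('born', []))
def pvBornCountA (cand : List (String × List Int)) : Int :=
  ((PySem.Dict.mk cand).getD "born" []).length

-- buckets.setdefault(born_count, []).append(cand) = modify with default [] appending
def pvBucketsA (pool : List (List (String × List Int))) :
    PySem.Dict Int (List (List (String × List Int))) :=
  pool.foldl (fun d cand => d.modify (pvBornCountA cand) [] (fun l => l ++ [cand]))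
    PySem.Dict.empty

-- the `for born_count in sorted(buckets.keys())` body, including the `break`.
-- `buckets[born_count]` is always present here (the key snapshot is fresh each pass and
-- each key is visited at most once before it can be erased), so `getD _ []` is exact.
def pvPassA : List Int → PySem.Dict Int (List (List (String × List Int))) →
    List (List (String × List Int)) → Int →
    PySem.Dict Int (List (List (String × List Int))) × List (List (String × List Int))
  | [], d, sel, _ => (d, sel)
  | k :: ks, d, sel, b =>
    match d.getD k [] with
    | [] => pvPassA ks (d.erase k) sel b            -- buckets.pop(born_count, None)
    | c :: rest =>                                   -- selected.append(bucket.pop(0))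
      if b ≤ ((sel ++ [c]).length : Int) then (d.insert k rest, sel ++ [c])   -- break
      else pvPassA ks (d.insert k rest) (sel ++ [c]) b

-- the while loop; fuel is only a totality guard (each pass strictly shrinks the measure
-- `total stored candidates + number of keys`, so the initial fuel below always suffices)
def pvWhileA : Nat → PySem.Dict Int (List (List (String × List Int))) →
    List (List (String × List Int)) → Int → List (List (String × List Int))
  | 0, _, sel, _ => sel
  | fuel + 1, d, sel, b =>
    if ((sel.length : Int) < b && d.size != 0) then
      let p := pvPassA (PySem.List.sorted d.keys (fun k => k) false) d sel b
      pvWhileA fuel p.1 p.2 b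
    else sel

def diversity_sampling_py (pool : List (List (String × List Int))) (batch_size : Int) :
    List (List (String × List Int)) :=
  if batch_size ≤ 0 then []
  else
    let d := pvBucketsA pool
    pvWhileA ((d.values.map List.length).sum + d.size + 1) d [] batch_size

-- ===== PORT B =====
def diversity_sampling_py_alt (pool : List (List (String × List Int))) (batch_size : Int) :
    List (List (String × List Int)) :=
  if batch_size ≤ 0 then []
  else
    let st := pool.foldl
      (fun (st : PySem.Dict Int Int × List (Int × Int × List (String × List Int))) cand =>
        let bc : Int := ((PySem.Dict.mk cand).getD "born" []).length
        let rank := st.1.getD bc 0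
        (st.1.insert bc (rank + 1), st.2 ++ [(rank, bc, cand)]))
      (PySem.Dict.empty, [])
    let sortedDec := PySem.List.sorted2 st.2 (fun t => t.1) (fun t => t.2.1) false
    (PySem.List.slice sortedDec none (some batch_size)).map (fun t => t.2.2)

-- ===== PRECONDITION & SPEC =====
def Spec_diversity_sampling_py (pool : List (List (String × List Int))) (batch_size : Int) (out : List (List (String × List Int))) : Prop := out = diversity_sampling_py_alt pool batch_size
instance (pool : List (List (String × List Int))) (batch_size : Int) (out : List (List (String × List Int))) : Decidable (Spec_diversity_sampling_py pool batch_size out) := by unfold Spec_diversity_sampling_py; infer_instance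

-- ===== CLAIM (what is proved, stated in full; the proofs are below) =====
def Claim_equal_diversity_sampling_py : Prop := ∀ (pool : List (List (String × List Int))) (batch_size : Int), Dom_diversity_sampling_py pool batch_size → Spec_diversity_sampling_py pool batch_size (diversity_sampling_py pool batch_size)

-- ===== LEMMAS AND PROOFS =====

-- `pb pool k`: the candidates of born_count k, in pool order (A's bucket k as first built)
def pvPb (pool : List (List (String × List Int))) (k : Int) : List (List (String × List Int)) :=
  pool.filter (fun c => decide (pvBornCountA c = k))

-- reference decoration: `pvGo cs f` tags each candidate with (f bc + earlier same-bc count, bc)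
def pvGo : List (List (String × List Int)) → (Int → Int) →
    List (Int × Int × List (String × List Int))
  | [], _ => []
  | c :: cs, f =>
    (f (pvBornCountA c), pvBornCountA c, c) ::
      pvGo cs (fun k => if k = pvBornCountA c then f k + 1 else f k)

def pvDec (pool : List (List (String × List Int))) : List (Int × Int × List (String × List Int)) :=
  pvGo pool (fun _ => 0)

-- measure of a bucket state
def pvMu (d : PySem.Dict Int (List (List (String × List Int)))) : Nat :=
  (d.values.map List.length).sum + d.size

-- one full pass over the key snapshot, no batch limit (the dict A holds when no break fires)
def pvStepD (d : PySem.Dict Int (List (List (String × List Int)))) (k : Int) :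
    PySem.Dict Int (List (List (String × List Int))) :=
  match d.getD k [] with
  | [] => d.erase k
  | _ :: rest => d.insert k rest

def pvPassD (ks : List Int) (d : PySem.Dict Int (List (List (String × List Int)))) :
    PySem.Dict Int (List (List (String × List Int))) :=
  ks.foldl pvStepD d

-- what one pass emits
def pvEmit (ks : List Int) (d : PySem.Dict Int (List (List (String × List Int)))) :
    List (List (String × List Int)) :=
  ks.filterMap (fun k => (d.getD k []).head?)

-- the full (unlimited) round-robin emission from a bucket state
def pvRR : Nat → PySem.Dict Int (List (List (String × List Int))) →
    List (List (String × List Int))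
  | 0, _ => []
  | n + 1, d =>
    if d.size = 0 then []
    else
      pvEmit (PySem.List.sorted d.keys (fun k => k) false) d ++
        pvRR n (pvPassD (PySem.List.sorted d.keys (fun k => k) false) d)

-- bucket-state invariant after r0 complete passes over pvBucketsA pool
def pvInv (pool : List (List (String × List Int)))
    (d : PySem.Dict Int (List (List (String × List Int)))) (r0 : Nat) : Prop :=
  d.keys.Nodup ∧ ∀ k : Int, d.get? k =
    if max r0 1 ≤ (pvPb pool k).length then some ((pvPb pool k).drop r0) else none

-- strict lexicographic order on (rank, born_count)
def pvLex (a b : Int × Int × List (String × List Int)) : Prop :=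
  a.1 < b.1 ∨ (a.1 = b.1 ∧ a.2.1 < b.2.1)

-- ---------- generic Dict facts (items-level) ----------
theorem pv_get?_erase {ν : Type} (d : PySem.Dict Int ν) (k k' : Int) :
    (d.erase k).get? k' = if k' = k then none else d.get? k' := by
  obtain ⟨l⟩ := d
  induction l with
  | nil => simp [PySem.Dict.erase, PySem.Dict.get?]
  | cons p l ih =>
    by_cases h2 : k' = k
    · subst h2
      by_cases h1 : p.1 = k' <;>
        simp_all [PySem.Dict.erase, PySem.Dict.get?, List.filter_cons, List.find?_cons, h1]
    · have hkk' : (k == k') = false := by simp; exact fun h => h2 h.symm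
      by_cases h1 : p.1 = k <;> by_cases h3 : p.1 = k' <;>
        simp_all [PySem.Dict.erase, PySem.Dict.get?, List.filter_cons, List.find?_cons, hkk']

theorem pv_keys_erase {ν : Type} (d : PySem.Dict Int ν) (k : Int) :
    (d.erase k).keys = d.keys.filter (fun x => !(x == k)) := by
  obtain ⟨l⟩ := d
  simp only [PySem.Dict.erase, PySem.Dict.keys, PySem.Dict.items]
  induction l with
  | nil => simp
  | cons p l ih =>
    by_cases h1 : p.1 = k <;> simp_all [List.filter_cons]


theorem pv_nodup_keys_erase {ν : Type} (d : PySem.Dict Int ν) (k : Int)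
    (h : d.keys.Nodup) : (d.erase k).keys.Nodup := by
  rw [pv_keys_erase]; exact h.filter _


theorem pv_mem_keys_iff_isSome {ν : Type} (d : PySem.Dict Int ν) (k : Int) :
    k ∈ d.keys ↔ (d.get? k).isSome := by
  obtain ⟨l⟩ := d
  induction l with
  | nil => simp [PySem.Dict.keys, PySem.Dict.get?]
  | cons p l ih =>
    by_cases h1 : p.1 = k
    · simp [PySem.Dict.keys, PySem.Dict.get?, List.find?_cons, h1]
    · simp_all [PySem.Dict.keys, PySem.Dict.get?, List.find?_cons, h1]
      intro h2; exact absurd h2.symm h1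


theorem pv_mu_erase (d : PySem.Dict Int (List (List (String × List Int)))) (k : Int)
    (hnd : d.keys.Nodup) (v : List (List (String × List Int))) (h : d.get? k = some v) :
    pvMu (d.erase k) + v.length + 1 = pvMu d := by
  obtain ⟨l⟩ := d
  induction l with
  | nil => simp [PySem.Dict.get?] at h
  | cons p l ih =>
    simp only [PySem.Dict.keys, PySem.Dict.items, List.map_cons, List.nodup_cons] at hnd
    by_cases h1 : p.1 = k
    · have hv : p.2 = v := by simpa [PySem.Dict.get?, List.find?_cons, h1] using h
      have hl : l.filter (fun q => !(q.1 == k)) = l := by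
        apply List.filter_eq_self.mpr
        intro q hq
        have : q.1 ≠ k := fun hk => hnd.1 (by
          exact (h1 ▸ hk ▸ List.mem_map_of_mem hq : p.1 ∈ l.map (fun x => x.1)))
        simpa using this
      simp only [pvMu, PySem.Dict.erase, PySem.Dict.items, PySem.Dict.values, PySem.Dict.size,
        List.filter_cons, h1, hl]
      simp [hv]
      omega
    · have h' : (PySem.Dict.mk l).get? k = some v := by
        simpa [PySem.Dict.get?, List.find?_cons, h1] using h
      have ihv := ih (by simpa [PySem.Dict.keys] using hnd.2) h'
      simp only [pvMu, PySem.Dict.erase, PySem.Dict.items, PySem.Dict.values, PySem.Dict.size,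
        List.filter_cons, h1] at ihv ⊢
      simp only [show (!(p.1 == k)) = true by simpa using h1]
      simp at ihv ⊢
      omega


theorem pv_mu_insert (d : PySem.Dict Int (List (List (String × List Int)))) (k : Int)
    (hnd : d.keys.Nodup) (c : List (String × List Int)) (rest : List (List (String × List Int)))
    (h : d.get? k = some (c :: rest)) :
    pvMu (d.insert k rest) + 1 = pvMu d := by
  obtain ⟨l⟩ := d
  induction l with
  | nil => simp [PySem.Dict.get?] at h
  | cons p l ih =>
    simp only [PySem.Dict.keys, PySem.Dict.items, List.map_cons, List.nodup_cons] at hnd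
    have hc : (PySem.Dict.mk (p :: l)).contains k = true := by
      have : ((PySem.Dict.mk (p :: l)).get? k).isSome := by simp [h]
      simpa [PySem.Dict.contains, PySem.Dict.get?, List.find?_isSome] using this
    by_cases h1 : p.1 = k
    · have hv : p.2 = c :: rest := by simpa [PySem.Dict.get?, List.find?_cons, h1] using h
      have hl : l.map (fun q => if (q.1 == k) = true then (k, rest) else q) = l := by
        apply List.map_congr_left ?_ |>.trans l.map_id
        intro q hq
        have : q.1 ≠ k := fun hk => hnd.1 (by
          exact (h1 ▸ hk ▸ List.mem_map_of_mem hq : p.1 ∈ l.map (fun x => x.1)))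
        simp [this]
      simp only [pvMu, PySem.Dict.insert, hc, if_true, PySem.Dict.items, PySem.Dict.values,
        PySem.Dict.size, List.map_cons, h1, hl]
      simp [h1, hv]
      omega
    · have h' : (PySem.Dict.mk l).get? k = some (c :: rest) := by
        simpa [PySem.Dict.get?, List.find?_cons, h1] using h
      have hc' : (PySem.Dict.mk l).contains k = true := by
        have : ((PySem.Dict.mk l).get? k).isSome := by simp [h']
        simpa [PySem.Dict.contains, PySem.Dict.get?, List.find?_isSome] using this
      have ihv := ih (by simpa [PySem.Dict.keys] using hnd.2) h'
      simp only [pvMu, PySem.Dict.insert, hc, hc', if_true, PySem.Dict.items, PySem.Dict.values,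
        PySem.Dict.size, List.map_cons] at ihv ⊢
      simp only [show (p.1 == k) = false by simpa using h1]
      simp at ihv ⊢
      omega


theorem pv_erase_of_get?_eq_none {ν : Type} (d : PySem.Dict Int ν) (a : Int)
    (h : d.get? a = none) : d.erase a = d := by
  obtain ⟨l⟩ := d
  simp only [PySem.Dict.erase, PySem.Dict.items, PySem.Dict.mk.injEq]
  apply List.filter_eq_self.mpr
  intro p hp
  simp only [PySem.Dict.get?, Option.map_eq_none_iff, List.find?_eq_none] at h
  simpa using h p hp

theorem pv_get?_stepD (d : PySem.Dict Int (List (List (String × List Int)))) (a k : Int) :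
    (pvStepD d a).get? k =
      if k = a then (match d.getD a [] with | [] => none | _ :: rest => some rest)
      else d.get? k := by
  unfold pvStepD
  cases hda : d.getD a [] with
  | nil => simp [pv_get?_erase]
  | cons c rest => rw [PySem.Dict.get?_insert]

theorem pv_getD_stepD_of_ne (d : PySem.Dict Int (List (List (String × List Int)))) (a k : Int)
    (hk : k ≠ a) : (pvStepD d a).getD k [] = d.getD k [] := by
  simp [PySem.Dict.getD, pv_get?_stepD, hk]

theorem pv_nodup_keys_stepD (d : PySem.Dict Int (List (List (String × List Int)))) (a : Int)
    (h : d.keys.Nodup) : (pvStepD d a).keys.Nodup := by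
  unfold pvStepD
  cases d.getD a [] with
  | nil => exact pv_nodup_keys_erase d a h
  | cons c rest => exact PySem.Dict.nodup_keys_insert d a rest h

theorem pv_mu_stepD_le (d : PySem.Dict Int (List (List (String × List Int)))) (a : Int)
    (hnd : d.keys.Nodup) : pvMu (pvStepD d a) ≤ pvMu d := by
  unfold pvStepD
  cases hg : d.get? a with
  | none =>
    have hda : d.getD a [] = [] := by simp [PySem.Dict.getD, hg]
    rw [hda, pv_erase_of_get?_eq_none d a hg]
  | some v =>
    have hda : d.getD a [] = v := by simp [PySem.Dict.getD, hg]
    cases v with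
    | nil =>
      have hst : d.erase a = (match d.getD a [] with
        | [] => d.erase a | _ :: rest => d.insert a rest) := by rw [hda]
      rw [← hst]
      have := pv_mu_erase d a hnd [] hg; omega
    | cons c rest =>
      have hst : d.insert a rest = (match d.getD a [] with
        | [] => d.erase a | _ :: rest => d.insert a rest) := by rw [hda]
      rw [← hst]
      have := pv_mu_insert d a hnd c rest hg; omega

theorem pv_mu_stepD_lt (d : PySem.Dict Int (List (List (String × List Int)))) (a : Int)
    (hnd : d.keys.Nodup) (ha : a ∈ d.keys) : pvMu (pvStepD d a) < pvMu d := by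
  obtain ⟨v, hg⟩ := Option.isSome_iff_exists.mp ((pv_mem_keys_iff_isSome d a).mp ha)
  unfold pvStepD
  have hda : d.getD a [] = v := by simp [PySem.Dict.getD, hg]
  cases v with
  | nil =>
    have hst : d.erase a = (match d.getD a [] with
      | [] => d.erase a | _ :: rest => d.insert a rest) := by rw [hda]
    rw [← hst]
    have := pv_mu_erase d a hnd [] hg; omega
  | cons c rest =>
    have hst : d.insert a rest = (match d.getD a [] with
      | [] => d.erase a | _ :: rest => d.insert a rest) := by rw [hda]
    rw [← hst]
    have := pv_mu_insert d a hnd c rest hg; omega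

-- ---------- pass lemmas ----------
theorem pv_get?_passD (ks : List Int) (d : PySem.Dict Int (List (List (String × List Int))))
    (k : Int) (hnd : ks.Nodup) :
    (pvPassD ks d).get? k =
      if k ∈ ks then
        (match d.getD k [] with | [] => none | _ :: rest => some rest)
      else d.get? k := by
  induction ks generalizing d with
  | nil => simp [pvPassD]
  | cons a ks ih =>
    simp only [List.nodup_cons] at hnd
    have hrec : pvPassD (a :: ks) d = pvPassD ks (pvStepD d a) := rfl
    rw [hrec, ih _ hnd.2]
    by_cases hk : k ∈ ks
    · have hka : k ≠ a := fun h => hnd.1 (h ▸ hk)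
      simp [hk, pv_getD_stepD_of_ne d a k hka]
    · by_cases hka : k = a
      · subst hka
        simp [hk, pv_get?_stepD]
      · simp [hk, hka, pv_get?_stepD]


theorem pv_nodup_keys_passD (ks : List Int) (d : PySem.Dict Int (List (List (String × List Int))))
    (h : d.keys.Nodup) : (pvPassD ks d).keys.Nodup := by
  induction ks generalizing d with
  | nil => exact h
  | cons a ks ih => exact ih _ (pv_nodup_keys_stepD d a h)


theorem pv_mu_passD_le (ks : List Int) (d : PySem.Dict Int (List (List (String × List Int))))
    (hnd : d.keys.Nodup) : pvMu (pvPassD ks d) ≤ pvMu d := by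
  induction ks generalizing d with
  | nil => exact le_refl _
  | cons a ks ih =>
    exact le_trans (ih _ (pv_nodup_keys_stepD d a hnd)) (pv_mu_stepD_le d a hnd)


theorem pv_mu_passD_lt (ks : List Int) (d : PySem.Dict Int (List (List (String × List Int))))
    (hnd : d.keys.Nodup) (hks : ∀ k ∈ ks, k ∈ d.keys) (hne : ks ≠ []) :
    pvMu (pvPassD ks d) < pvMu d := by
  cases ks with
  | nil => exact absurd rfl hne
  | cons a ks =>
    have h1 : pvMu (pvStepD d a) < pvMu d := pv_mu_stepD_lt d a hnd (hks a (by simp))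
    have h2 : pvMu (pvPassD ks (pvStepD d a)) ≤ pvMu (pvStepD d a) :=
      pv_mu_passD_le ks _ (pv_nodup_keys_stepD d a hnd)
    exact lt_of_le_of_lt h2 h1


theorem pv_emit_congr (ks : List Int) (d d' : PySem.Dict Int (List (List (String × List Int))))
    (h : ∀ k ∈ ks, d'.getD k [] = d.getD k []) : pvEmit ks d' = pvEmit ks d := by
  unfold pvEmit
  exact List.filterMap_congr (fun k hk => by rw [h k hk])


theorem pv_passA_sel (ks : List Int) (d : PySem.Dict Int (List (List (String × List Int))))
    (sel : List (List (String × List Int))) (b : Int) (hnd : ks.Nodup)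
    (hlt : (sel.length : Int) < b) :
    (pvPassA ks d sel b).2 = sel ++ (pvEmit ks d).take (b - sel.length).toNat := by
  induction ks generalizing d sel with
  | nil => simp [pvPassA, pvEmit]
  | cons k ks ih =>
    simp only [List.nodup_cons] at hnd
    cases hg : d.getD k [] with
    | nil =>
      have he : pvEmit (k :: ks) d = pvEmit ks d := by simp [pvEmit, hg]
      have he2 : pvEmit ks (d.erase k) = pvEmit ks d := by
        apply pv_emit_congr
        intro k' hk'
        have : k' ≠ k := fun h => hnd.1 (h ▸ hk')
        simp [PySem.Dict.getD, pv_get?_erase, this]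
      have hstep : pvPassA (k :: ks) d sel b = pvPassA ks (d.erase k) sel b := by
        simp only [pvPassA, hg]
      rw [hstep, ih _ _ hnd.2 hlt, he, he2]
    | cons c rest =>
      have he : pvEmit (k :: ks) d = c :: pvEmit ks d := by simp [pvEmit, hg]
      rw [he]
      by_cases hb : b ≤ ((sel ++ [c]).length : Int)
      · have hstep : pvPassA (k :: ks) d sel b = (d.insert k rest, sel ++ [c]) := by
          simp only [pvPassA, hg]; rw [if_pos hb]
        have hn : (b - sel.length).toNat = 1 := by
          simp only [List.length_append, List.length_cons, List.length_nil] at hb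
          omega
        rw [hstep, hn]
        simp
      · have hstep : pvPassA (k :: ks) d sel b = pvPassA ks (d.insert k rest) (sel ++ [c]) b := by
          simp only [pvPassA, hg]; rw [if_neg hb]
        have hlt' : (((sel ++ [c]).length : Nat) : Int) < b := by
          simp only [List.length_append, List.length_cons, List.length_nil] at hb ⊢
          omega
        have he2 : pvEmit ks (d.insert k rest) = pvEmit ks d := by
          apply pv_emit_congr
          intro k' hk'
          have hne : k' ≠ k := fun h => hnd.1 (h ▸ hk')
          simp [PySem.Dict.getD, PySem.Dict.get?_insert, hne]
        rw [hstep, ih _ _ hnd.2 hlt', he2]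
        have hn : (b - sel.length).toNat = (b - ((sel ++ [c]).length : Int)).toNat + 1 := by
          simp only [List.length_append, List.length_cons, List.length_nil] at hb ⊢
          omega
        rw [hn, List.take_succ_cons]
        simp


theorem pv_passA_dict (ks : List Int) (d : PySem.Dict Int (List (List (String × List Int))))
    (sel : List (List (String × List Int))) (b : Int) (hnd : ks.Nodup)
    (hno : ¬ b ≤ (sel.length : Int) + (pvEmit ks d).length) :
    (pvPassA ks d sel b).1 = pvPassD ks d := by
  induction ks generalizing d sel with
  | nil => simp [pvPassA, pvPassD]
  | cons k ks ih =>
    simp only [List.nodup_cons] at hnd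
    cases hg : d.getD k [] with
    | nil =>
      have he : pvEmit (k :: ks) d = pvEmit ks d := by simp [pvEmit, hg]
      have he2 : pvEmit ks (d.erase k) = pvEmit ks d := by
        apply pv_emit_congr
        intro k' hk'
        have : k' ≠ k := fun h => hnd.1 (h ▸ hk')
        simp [PySem.Dict.getD, pv_get?_erase, this]
      have hstep : pvPassA (k :: ks) d sel b = pvPassA ks (d.erase k) sel b := by
        simp only [pvPassA, hg]
      have hD : pvPassD (k :: ks) d = pvPassD ks (d.erase k) := by
        simp [pvPassD, pvStepD, hg]
      rw [hstep, hD]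
      exact ih _ _ hnd.2 (by rw [he2]; rw [he] at hno; exact hno)
    | cons c rest =>
      have he : pvEmit (k :: ks) d = c :: pvEmit ks d := by simp [pvEmit, hg]
      rw [he] at hno
      have hb : ¬ b ≤ ((sel ++ [c]).length : Int) := by
        simp only [List.length_cons] at hno
        simp only [List.length_append, List.length_cons, List.length_nil]
        push_cast at hno ⊢
        omega
      have hstep : pvPassA (k :: ks) d sel b = pvPassA ks (d.insert k rest) (sel ++ [c]) b := by
        simp only [pvPassA, hg]; rw [if_neg hb]
      have hD : pvPassD (k :: ks) d = pvPassD ks (d.insert k rest) := by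
        simp [pvPassD, pvStepD, hg]
      have he2 : pvEmit ks (d.insert k rest) = pvEmit ks d := by
        apply pv_emit_congr
        intro k' hk'
        have hne : k' ≠ k := fun h => hnd.1 (h ▸ hk')
        simp [PySem.Dict.getD, PySem.Dict.get?_insert, hne]
      rw [hstep, hD]
      apply ih _ _ hnd.2
      rw [he2]
      simp only [List.length_cons] at hno
      simp only [List.length_append, List.length_cons, List.length_nil]
      push_cast at hno ⊢
      omega


-- ---------- while loop = truncated round robin ----------
theorem pv_whileA_done (fuel : Nat) (d : PySem.Dict Int (List (List (String × List Int))))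
    (sel : List (List (String × List Int))) (b : Int) (h : b ≤ (sel.length : Int)) :
    pvWhileA fuel d sel b = sel := by
  have hb : ¬ ((sel.length : Int) < b) := not_lt.mpr h
  cases fuel with
  | zero => rfl
  | succ n => simp [pvWhileA, hb]


theorem pv_RR_size_zero (fuel : Nat) (d : PySem.Dict Int (List (List (String × List Int))))
    (h : d.size = 0) : pvRR fuel d = [] := by
  cases fuel with
  | zero => rfl
  | succ n => simp [pvRR, h]


theorem pv_whileA_eq (fuel : Nat) (d : PySem.Dict Int (List (List (String × List Int))))
    (sel : List (List (String × List Int))) (b : Int) (hnd : d.keys.Nodup)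
    (hfuel : pvMu d ≤ fuel) :
    pvWhileA fuel d sel b = sel ++ (pvRR fuel d).take (b - sel.length).toNat := by
  induction fuel generalizing d sel with
  | zero => simp [pvWhileA, pvRR]
  | succ fuel ih =>
    by_cases hcond : ((sel.length : Int) < b ∧ d.size ≠ 0)
    · have hbcond : (decide ((sel.length : Int) < b) && (d.size != 0)) = true := by
        simp [hcond.1, hcond.2]
      have hw : pvWhileA (fuel + 1) d sel b =
          pvWhileA fuel (pvPassA (PySem.List.sorted d.keys (fun k => k) false) d sel b).1
            (pvPassA (PySem.List.sorted d.keys (fun k => k) false) d sel b).2 b := by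
        rw [pvWhileA, hbcond]
        rfl
      have hR : pvRR (fuel + 1) d =
          pvEmit (PySem.List.sorted d.keys (fun k => k) false) d ++
            pvRR fuel (pvPassD (PySem.List.sorted d.keys (fun k => k) false) d) := by
        rw [pvRR, if_neg hcond.2]
      set ks := PySem.List.sorted d.keys (fun k => k) false with hks
      have hknd : ks.Nodup := ((PySem.List.sorted_perm d.keys (fun k => k) false).nodup_iff).mpr hnd
      have hsel := pv_passA_sel ks d sel b hknd hcond.1
      rw [hw, hR]
      by_cases hbr : b ≤ (sel.length : Int) + (pvEmit ks d).length
      · have hlen : b ≤ ((pvPassA ks d sel b).2.length : Int) := by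
          rw [hsel]
          simp only [List.length_append, List.length_take]
          push_cast
          omega
        rw [pv_whileA_done _ _ _ _ hlen, hsel, List.take_append]
        have h0 : ((b - (sel.length : Int)).toNat - (pvEmit ks d).length) = 0 := by omega
        rw [h0]
        simp
      · have hdict := pv_passA_dict ks d sel b hknd hbr
        have hne : ks ≠ [] := by
          rw [hks, ne_eq, PySem.List.sorted_eq_nil_iff]
          intro hk
          apply hcond.2
          have : d.items.length = 0 := by
            simpa [PySem.Dict.keys] using congrArg List.length hk
          simpa [PySem.Dict.size] using this
        have hmu : pvMu (pvPassD ks d) ≤ fuel := by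
          have := pv_mu_passD_lt ks d hnd
            (fun k hk => by
              rw [hks] at hk
              exact (PySem.List.mem_sorted d.keys (fun k => k) false k).mp hk) hne
          omega
        have hnd' : (pvPassD ks d).keys.Nodup := pv_nodup_keys_passD ks d hnd
        have htk : (pvEmit ks d).take (b - (sel.length : Int)).toNat = pvEmit ks d := by
          apply List.take_of_length_le
          omega
        rw [hdict, hsel, htk, ih _ _ hnd' hmu, List.take_append, htk, ← List.append_assoc]
        congr 2
        simp only [List.length_append]
        push_cast
        omega
    · have hbcond : (decide ((sel.length : Int) < b) && (d.size != 0)) = false := by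
        rcases not_and_or.mp hcond with h | h
        · simp [h]
        · simp only [ne_eq, not_not] at h
          simp [h]
      have hw : pvWhileA (fuel + 1) d sel b = sel := by
        rw [pvWhileA, hbcond]
        rfl
      rw [hw]
      rcases not_and_or.mp hcond with h | h
      · have h0 : (b - (sel.length : Int)).toNat = 0 := by
          simp only [not_lt] at h
          omega
        rw [h0]
        simp
      · simp only [ne_eq, not_not] at h
        rw [pv_RR_size_zero _ _ h]
        simp

-- ---------- decoration facts ----------
theorem pv_go_rank_lb (cs : List (List (String × List Int))) (f : Int → Int) :
    ∀ t ∈ pvGo cs f, f t.2.1 ≤ t.1 := by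
  induction cs generalizing f with
  | nil => simp [pvGo]
  | cons c cs ih =>
    intro t ht
    simp only [pvGo, List.mem_cons] at ht
    rcases ht with rfl | ht
    · simp
    · have hlb := ih _ t ht
      by_cases hk : t.2.1 = pvBornCountA c
      · simp only [hk, if_pos] at hlb
        rw [hk]
        omega
      · simpa [hk] using hlb


theorem pv_mem_go (cs : List (List (String × List Int))) (f : Int → Int)
    (t : Int × Int × List (String × List Int)) :
    t ∈ pvGo cs f ↔ ∃ (k : Int) (i : Nat) (h : i < (cs.filter (fun c => decide (pvBornCountA c = k))).length),
      t = (f k + (i : Int), k, (cs.filter (fun c => decide (pvBornCountA c = k)))[i]) := by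
  induction cs generalizing f t with
  | nil => simp [pvGo]
  | cons c cs ih =>
    constructor
    · intro ht
      simp only [pvGo, List.mem_cons] at ht
      rcases ht with rfl | ht
      · refine ⟨pvBornCountA c, 0, ?_, ?_⟩ <;> simp [List.filter_cons]
      · obtain ⟨k, i, hi, ht⟩ := (ih _ _).mp ht
        by_cases hk : k = pvBornCountA c
        · have hfil : (c :: cs).filter (fun x => decide (pvBornCountA x = k)) =
              c :: cs.filter (fun x => decide (pvBornCountA x = k)) := by
            simp [List.filter_cons, hk]
          refine ⟨k, i + 1, by simp only [hfil]; simpa using Nat.succ_lt_succ hi, ?_⟩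
          rw [ht]
          simp only [hfil, List.getElem_cons_succ, if_pos hk]
          congr 1
          push_cast
          ring
        · have hfil : (c :: cs).filter (fun x => decide (pvBornCountA x = k)) =
              cs.filter (fun x => decide (pvBornCountA x = k)) := by
            simp [List.filter_cons]
            intro h; exact absurd h.symm hk
          refine ⟨k, i, by simp only [hfil]; exact hi, ?_⟩
          rw [ht]
          simp only [hfil, if_neg hk]
    · rintro ⟨k, i, hi, rfl⟩
      by_cases hk : k = pvBornCountA c
      · have hfil : (c :: cs).filter (fun x => decide (pvBornCountA x = k)) =
            c :: cs.filter (fun x => decide (pvBornCountA x = k)) := by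
          simp [List.filter_cons, hk]
        cases i with
        | zero =>
          simp only [pvGo, List.mem_cons]
          left
          simp [hfil, hk]
        | succ i =>
          simp only [pvGo, List.mem_cons]
          right
          apply (ih _ _).mpr
          simp only [hfil] at hi
          refine ⟨k, i, by simpa using hi, ?_⟩
          simp only [hfil, List.getElem_cons_succ, if_pos hk]
          congr 1
          push_cast
          ring
      · have hfil : (c :: cs).filter (fun x => decide (pvBornCountA x = k)) =
            cs.filter (fun x => decide (pvBornCountA x = k)) := by
          simp [List.filter_cons]
          intro h; exact absurd h.symm hk
        simp only [pvGo, List.mem_cons]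
        right
        apply (ih _ _).mpr
        simp only [hfil] at hi
        refine ⟨k, i, hi, ?_⟩
        simp only [hfil, if_neg hk]
theorem pv_go_pairwise (cs : List (List (String × List Int))) (f : Int → Int) :
    (pvGo cs f).Pairwise (fun a b => a.2.1 = b.2.1 → a.1 < b.1) := by
  induction cs generalizing f with
  | nil => exact List.Pairwise.nil
  | cons c cs ih =>
    refine List.pairwise_cons.mpr ⟨?_, ih _⟩
    intro t ht hbc
    have hlb := pv_go_rank_lb cs _ t ht
    have h2 : t.2.1 = pvBornCountA c := by simpa using hbc.symm
    simp only [h2, if_pos] at hlb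
    have hgoal : f (pvBornCountA c) < t.1 := by omega
    simpa using hgoal
theorem pv_nodup_dec (pool : List (List (String × List Int))) : (pvDec pool).Nodup := by
  have h := pv_go_pairwise pool (fun _ => 0)
  exact h.imp (fun {a b} hab he => by
    subst he
    exact absurd (hab rfl) (lt_irrefl _))


theorem pv_fold_alt (pool : List (List (String × List Int))) (seen : PySem.Dict Int Int)
    (acc : List (Int × Int × List (String × List Int))) :
    (pool.foldl
      (fun (st : PySem.Dict Int Int × List (Int × Int × List (String × List Int))) cand =>
        let bc : Int := ((PySem.Dict.mk cand).getD "born" []).length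
        let rank := st.1.getD bc 0
        (st.1.insert bc (rank + 1), st.2 ++ [(rank, bc, cand)]))
      (seen, acc)).2 = acc ++ pvGo pool (fun k => seen.getD k 0) := by
  induction pool generalizing seen acc with
  | nil => simp [pvGo]
  | cons c pool ih =>
    simp only [List.foldl_cons]
    rw [ih]
    rw [show ((((PySem.Dict.mk c).getD "born" []).length : Int)) = pvBornCountA c from rfl]
    have hfun : (fun k => (seen.insert (pvBornCountA c) (seen.getD (pvBornCountA c) 0 + 1)).getD k 0)
        = (fun k => if k = pvBornCountA c then seen.getD k 0 + 1 else seen.getD k 0) := by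
      funext k
      rw [PySem.Dict.getD_insert]
      by_cases hk : k = pvBornCountA c
      · simp [hk]
      · simp [hk]
    simp only [pvGo]
    rw [← List.append_cons, hfun]
theorem pv_mem_dec (pool : List (List (String × List Int))) (t : Int × Int × List (String × List Int)) :
    t ∈ pvDec pool ↔ ∃ (k : Int) (i : Nat) (h : i < (pvPb pool k).length),
      t = ((i : Int), k, (pvPb pool k)[i]) := by
  unfold pvDec pvPb
  rw [pv_mem_go]
  constructor
  · rintro ⟨k, i, hi, rfl⟩
    exact ⟨k, i, hi, by simp⟩
  · rintro ⟨k, i, hi, rfl⟩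
    exact ⟨k, i, hi, by simp⟩

theorem pv_get?_of_size_zero {ν : Type} (d : PySem.Dict Int ν) (h : d.size = 0) (k : Int) :
    d.get? k = none := by
  obtain ⟨l⟩ := d
  have hl : l = [] := List.length_eq_zero_iff.mp h
  subst hl
  simp [PySem.Dict.get?]

theorem pv_dec_filter_empty (pool : List (List (String × List Int))) (r0 : Nat)
    (h : ∀ k : Int, (pvPb pool k).length < max r0 1) :
    (pvDec pool).filter (fun t => decide ((r0 : Int) ≤ t.1)) = [] := by
  apply List.filter_eq_nil_iff.mpr
  intro t ht
  obtain ⟨k, i, hi, rfl⟩ := (pv_mem_dec pool t).mp ht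
  have := h k
  simp only [decide_eq_true_eq]
  omega

theorem pv_get?_buckets (pool : List (List (String × List Int))) (k : Int) :
    (pvBucketsA pool).get? k =
      if (pvPb pool k).length = 0 then none else some (pvPb pool k) := by
  have aux : ∀ (pool : List (List (String × List Int)))
      (d : PySem.Dict Int (List (List (String × List Int)))) (k : Int),
      (pool.foldl (fun d cand => d.modify (pvBornCountA cand) [] (fun l => l ++ [cand])) d).get? k =
        if (d.get? k).isSome ∨ pvPb pool k ≠ []
        then some (d.getD k [] ++ pvPb pool k) else none := by
    intro pool
    induction pool with
    | nil =>
      intro d k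
      by_cases h : (d.get? k).isSome
      · obtain ⟨v, hv⟩ := Option.isSome_iff_exists.mp h
        simp [pvPb, hv, PySem.Dict.getD]
      · simp only [Option.not_isSome_iff_eq_none] at h
        simp [pvPb, h]
    | cons c pool ih =>
      intro d k
      have hstep : (fun d cand => d.modify (pvBornCountA cand) [] (fun l => l ++ [cand])) d c
          = d.insert (pvBornCountA c) (d.getD (pvBornCountA c) [] ++ [c]) := rfl
      simp only [List.foldl_cons, hstep, ih]
      by_cases hk : pvBornCountA c = k
      · have hfil : pvPb (c :: pool) k = c :: pvPb pool k := by
          simp [pvPb, List.filter_cons, hk]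
        have hg : (d.insert (pvBornCountA c) (d.getD (pvBornCountA c) [] ++ [c])).get? k
            = some (d.getD k [] ++ [c]) := by
          rw [PySem.Dict.get?_insert, if_pos hk.symm, hk]
        have hgd : (d.insert (pvBornCountA c) (d.getD (pvBornCountA c) [] ++ [c])).getD k []
            = d.getD k [] ++ [c] := by
          have h0 : (d.insert (pvBornCountA c) (d.getD (pvBornCountA c) [] ++ [c])).getD k []
              = ((d.insert (pvBornCountA c) (d.getD (pvBornCountA c) [] ++ [c])).get? k).getD [] := rfl
          rw [h0, hg]
          rfl
        rw [hg, hgd, hfil]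
        simp
      · have hfil : pvPb (c :: pool) k = pvPb pool k := by
          simp only [pvPb, List.filter_cons]
          rw [if_neg (by simpa using hk)]
        have hg : (d.insert (pvBornCountA c) (d.getD (pvBornCountA c) [] ++ [c])).get? k
            = d.get? k := by
          rw [PySem.Dict.get?_insert, if_neg (fun h => hk h.symm)]
        have hgd : (d.insert (pvBornCountA c) (d.getD (pvBornCountA c) [] ++ [c])).getD k []
            = d.getD k [] := by
          have h0 : (d.insert (pvBornCountA c) (d.getD (pvBornCountA c) [] ++ [c])).getD k []
              = ((d.insert (pvBornCountA c) (d.getD (pvBornCountA c) [] ++ [c])).get? k).getD [] := rfl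
          rw [h0, hg]
          rfl
        rw [hg, hgd, hfil]
  rw [pvBucketsA, aux pool PySem.Dict.empty k]
  have hnone : (PySem.Dict.empty : PySem.Dict Int (List (List (String × List Int)))).get? k = none :=
    PySem.Dict.get?_empty k
  rw [hnone]
  have hgd : (PySem.Dict.empty : PySem.Dict Int (List (List (String × List Int)))).getD k [] = [] := by
    simp [PySem.Dict.getD, hnone]
  rw [hgd]
  by_cases h : pvPb pool k = []
  · simp [h]
  · have : (pvPb pool k).length ≠ 0 := fun hl => h (List.length_eq_zero_iff.mp hl)
    simp [h, this]


theorem pv_inv_zero (pool : List (List (String × List Int))) : pvInv pool (pvBucketsA pool) 0 := by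
  constructor
  · exact PySem.Dict.nodup_keys_foldl_modify_key pool pvBornCountA []
      (fun _ cand => fun l => l ++ [cand]) PySem.Dict.empty PySem.Dict.nodup_keys_empty
  · intro k
    rw [pv_get?_buckets]
    by_cases h : (pvPb pool k).length = 0
    · rw [if_pos h, if_neg (by omega)]
    · rw [if_neg h, if_pos (by omega)]
      simp


-- ---------- invariant step and main round-robin characterisation ----------
theorem pv_inv_step (pool : List (List (String × List Int)))
    (d : PySem.Dict Int (List (List (String × List Int)))) (r0 : Nat) (h : pvInv pool d r0) :
    pvInv pool (pvPassD (PySem.List.sorted d.keys (fun k => k) false) d) (r0 + 1) := by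
  obtain ⟨hnd, hget⟩ := h
  have hknd : (PySem.List.sorted d.keys (fun k => k) false).Nodup :=
    ((PySem.List.sorted_perm d.keys (fun k => k) false).nodup_iff).mpr hnd
  refine ⟨pv_nodup_keys_passD _ _ hnd, ?_⟩
  intro k
  rw [pv_get?_passD _ _ _ hknd]
  have hmem : k ∈ PySem.List.sorted d.keys (fun k => k) false ↔
      max r0 1 ≤ (pvPb pool k).length := by
    rw [PySem.List.mem_sorted, pv_mem_keys_iff_isSome, hget k]
    split_ifs with h1
    · simpa using h1
    · simpa using h1
  by_cases hk : k ∈ PySem.List.sorted d.keys (fun k => k) false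
  · rw [if_pos hk]
    have hlen := hmem.mp hk
    have hgd : d.getD k [] = (pvPb pool k).drop r0 := by
      have h0 : d.getD k [] = (d.get? k).getD [] := rfl
      rw [h0, hget k, if_pos hlen]
      rfl
    rw [hgd]
    cases hdrop : (pvPb pool k).drop r0 with
    | nil =>
      have hle : (pvPb pool k).length ≤ r0 := List.drop_eq_nil_iff.mp hdrop
      rw [if_neg (by omega)]
    | cons c rest =>
      have hlt : r0 < (pvPb pool k).length := by
        by_contra hc
        rw [List.drop_eq_nil_iff.mpr (by omega)] at hdrop
        cases hdrop
      have hrest : rest = (pvPb pool k).drop (r0 + 1) := by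
        rw [List.drop_add_one_eq_tail_drop, hdrop]
        rfl
      rw [if_pos (by omega), hrest]
  · rw [if_neg hk]
    have hlen : (pvPb pool k).length < max r0 1 := by
      by_contra hc
      exact hk (hmem.mpr (by omega))
    rw [hget k, if_neg (by omega), if_neg (by omega)]


theorem pv_RR_spec (fuel : Nat) (pool : List (List (String × List Int)))
    (r0 : Nat) (d : PySem.Dict Int (List (List (String × List Int))))
    (hInv : pvInv pool d r0) (hfuel : pvMu d ≤ fuel) :
    ∃ L : List (Int × Int × List (String × List Int)),
      pvRR fuel d = L.map (fun t => t.2.2) ∧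
      L.Perm ((pvDec pool).filter (fun t => decide ((r0 : Int) ≤ t.1))) ∧
      L.Pairwise pvLex ∧ ∀ t ∈ L, (r0 : Int) ≤ t.1 := by
  induction fuel generalizing r0 d with
  | zero =>
    refine ⟨[], rfl, ?_, List.Pairwise.nil, by simp⟩
    have hsz : d.size = 0 := by
      have := hfuel
      unfold pvMu at this
      omega
    have hempty : ∀ k : Int, (pvPb pool k).length < max r0 1 := by
      intro k
      have hg := hInv.2 k
      rw [pv_get?_of_size_zero d hsz k] at hg
      by_contra hc
      rw [if_pos (by omega)] at hg
      cases hg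
    rw [pv_dec_filter_empty pool r0 hempty]
  | succ fuel ih =>
    by_cases hsz : d.size = 0
    · refine ⟨[], by rw [pvRR, if_pos hsz]; rfl, ?_, List.Pairwise.nil, by simp⟩
      have hempty : ∀ k : Int, (pvPb pool k).length < max r0 1 := by
        intro k
        have hg := hInv.2 k
        rw [pv_get?_of_size_zero d hsz k] at hg
        by_contra hc
        rw [if_pos (by omega)] at hg
        cases hg
      rw [pv_dec_filter_empty pool r0 hempty]
    · obtain ⟨hnd, hget⟩ := hInv
      set ks := PySem.List.sorted d.keys (fun k => k) false with hks
      have hknd : ks.Nodup :=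
        ((PySem.List.sorted_perm d.keys (fun k => k) false).nodup_iff).mpr hnd
      set R := ks.filterMap (fun k =>
          if h : r0 < (pvPb pool k).length then some ((r0 : Int), k, (pvPb pool k)[r0]) else none)
        with hR
      -- one pass emits exactly the rank-r0 row
      have hemit : pvEmit ks d = R.map (fun t => t.2.2) := by
        rw [hR, List.map_filterMap]
        unfold pvEmit
        apply List.filterMap_congr
        intro k hk
        have h0 : d.getD k [] = (d.get? k).getD [] := rfl
        rw [h0, hget k]
        by_cases h1 : max r0 1 ≤ (pvPb pool k).length
        · rw [if_pos h1]
          show ((pvPb pool k).drop r0).head? = _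
          rw [List.head?_drop]
          by_cases h2 : r0 < (pvPb pool k).length
          · rw [dif_pos h2]
            simp [List.getElem?_eq_getElem h2]
          · rw [dif_neg h2]
            simp [List.getElem?_eq_none (by omega : (pvPb pool k).length ≤ r0)]
        · rw [if_neg h1, dif_neg (by omega)]
          rfl
      have hksPW : ks.Pairwise (· < ·) := by
        have h1 := PySem.List.sorted_pairwise d.keys (fun k => k)
        exact (h1.and hknd).imp (fun {a b} hab => lt_of_le_of_ne hab.1 hab.2)
      have hRpw : R.Pairwise pvLex := by
        rw [hR]
        apply List.Pairwise.filterMap _ ?_ hksPW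
        intro a a' hlt t ht t' ht'
        by_cases h1 : r0 < (pvPb pool a).length
        · rw [dif_pos h1] at ht
          by_cases h2 : r0 < (pvPb pool a').length
          · rw [dif_pos h2] at ht'
            cases Option.some.inj ht
            cases Option.some.inj ht'
            exact Or.inr ⟨rfl, hlt⟩
          · rw [dif_neg h2] at ht'
            cases ht'
        · rw [dif_neg h1] at ht
          cases ht
      have hRrank : ∀ t ∈ R, t.1 = (r0 : Int) := by
        intro t ht
        rw [hR, List.mem_filterMap] at ht
        obtain ⟨k, _, hf⟩ := ht
        by_cases h1 : r0 < (pvPb pool k).length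
        · rw [dif_pos h1] at hf
          cases Option.some.inj hf
          rfl
        · rw [dif_neg h1] at hf
          cases hf
      have hRnd : R.Nodup := hRpw.imp (fun {a b} hab he => by
        subst he
        rcases hab with h | ⟨_, h⟩ <;> exact absurd h (lt_irrefl _))
      have hmemks : ∀ k : Int, k ∈ ks ↔ max r0 1 ≤ (pvPb pool k).length := by
        intro k
        rw [hks, PySem.List.mem_sorted, pv_mem_keys_iff_isSome, hget k]
        split_ifs with h1
        · simpa using h1
        · simpa using h1
      have hmemR : ∀ t, t ∈ R ↔ ∃ (k : Int) (h : r0 < (pvPb pool k).length),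
          t = ((r0 : Int), k, (pvPb pool k)[r0]) := by
        intro t
        rw [hR, List.mem_filterMap]
        constructor
        · rintro ⟨k, hk, hf⟩
          by_cases h1 : r0 < (pvPb pool k).length
          · rw [dif_pos h1] at hf
            exact ⟨k, h1, (Option.some.inj hf).symm⟩
          · rw [dif_neg h1] at hf
            cases hf
        · rintro ⟨k, h1, rfl⟩
          refine ⟨k, (hmemks k).mpr (by omega), by rw [dif_pos h1]⟩
      have hpermRow : R.Perm ((pvDec pool).filter (fun t => decide (t.1 = (r0 : Int)))) := by
        rw [List.perm_ext_iff_of_nodup hRnd ((pv_nodup_dec pool).filter _)]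
        intro t
        rw [hmemR, List.mem_filter]
        constructor
        · rintro ⟨k, h1, rfl⟩
          exact ⟨(pv_mem_dec pool _).mpr ⟨k, r0, h1, rfl⟩, by simp⟩
        · rintro ⟨ht, hrank⟩
          obtain ⟨k, i, hi, rfl⟩ := (pv_mem_dec pool _).mp ht
          simp only [decide_eq_true_eq] at hrank
          have hir : i = r0 := by exact_mod_cast hrank
          subst hir
          exact ⟨k, hi, rfl⟩
      have hsplit : ((pvDec pool).filter (fun t => decide ((r0 : Int) ≤ t.1))).Perm
          (((pvDec pool).filter (fun t => decide (t.1 = (r0 : Int)))) ++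
           ((pvDec pool).filter (fun t => decide ((r0 : Int) + 1 ≤ t.1)))) := by
        have hp := (List.filter_append_perm (fun t => decide (t.1 = (r0 : Int)))
          ((pvDec pool).filter (fun t => decide ((r0 : Int) ≤ t.1)))).symm
        rw [List.filter_filter, List.filter_filter] at hp
        have e1 : (pvDec pool).filter
            (fun a => decide (a.1 = (r0 : Int)) && decide ((r0 : Int) ≤ a.1))
            = (pvDec pool).filter (fun t => decide (t.1 = (r0 : Int))) := by
          apply List.filter_congr
          intro x _
          simp only [← Bool.decide_and, decide_eq_decide]
          omega
        have e2 : (pvDec pool).filter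
            (fun a => (!decide (a.1 = (r0 : Int))) && decide ((r0 : Int) ≤ a.1))
            = (pvDec pool).filter (fun t => decide ((r0 : Int) + 1 ≤ t.1)) := by
          apply List.filter_congr
          intro x _
          simp only [← decide_not, ← Bool.decide_and, decide_eq_decide]
          omega
        rw [e1, e2] at hp
        exact hp
      -- invariant step and induction hypothesis
      have hInv' := pv_inv_step pool d r0 ⟨hnd, hget⟩
      have hksne : ks ≠ [] := by
        rw [hks, ne_eq, PySem.List.sorted_eq_nil_iff]
        intro hk
        apply hsz
        have : d.items.length = 0 := by
          simpa [PySem.Dict.keys] using congrArg List.length hk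
        simpa [PySem.Dict.size] using this
      have hmu' : pvMu (pvPassD ks d) ≤ fuel := by
        have := pv_mu_passD_lt ks d hnd
          (fun k hk => by
            rw [hks] at hk
            exact (PySem.List.mem_sorted d.keys (fun k => k) false k).mp hk) hksne
        omega
      obtain ⟨L', hRR', hperm', hpw', hrank'⟩ := ih (r0 + 1) (pvPassD ks d) hInv' hmu'
      simp only [Nat.cast_add, Nat.cast_one] at hperm' hrank'
      refine ⟨R ++ L', ?_, ?_, ?_, ?_⟩
      · rw [pvRR, if_neg hsz, ← hks, hemit, hRR', List.map_append]
      · exact ((hpermRow.append hperm').trans hsplit.symm)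
      · rw [List.pairwise_append]
        refine ⟨hRpw, hpw', ?_⟩
        intro t ht u hu
        have h1 := hRrank t ht
        have h2 := hrank' u hu
        exact Or.inl (by omega)
      · intro t ht
        rcases List.mem_append.mp ht with h | h
        · rw [hRrank t h]
        · have := hrank' t h
          omega


theorem pv_sorted2_eq (xs L : List (Int × Int × List (String × List Int)))
    (hperm : L.Perm xs) (hpw : L.Pairwise pvLex) :
    PySem.List.sorted2 xs (fun t => t.1) (fun t => t.2.1) false = L := by
  have hbefore : (fun a b : Int × Int × List (String × List Int) =>
        decide (a.1 < b.1) || (!decide (b.1 < a.1) && decide (a.2.1 < b.2.1)))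
      = (fun a b : Int × Int × List (String × List Int) =>
        decide (toLex (a.1, a.2.1) < toLex (b.1, b.2.1))) := by
    funext a b
    simp only [← decide_not, ← Bool.decide_and, ← Bool.decide_or, decide_eq_decide,
      Prod.Lex.toLex_lt_toLex]
    omega
  have hlex : PySem.List.sorted2 xs (fun t => t.1) (fun t => t.2.1) false
      = PySem.List.sorted xs
          (fun t : Int × Int × List (String × List Int) => toLex (t.1, t.2.1)) false := by
    show xs.foldl (fun acc x => PySem.List.insertBy (fun a b =>
        decide (a.1 < b.1) || (!decide (b.1 < a.1) && decide (a.2.1 < b.2.1))) x acc) []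
      = xs.foldl (fun acc x => PySem.List.insertBy (fun a b =>
        decide (toLex (a.1, a.2.1) < toLex (b.1, b.2.1))) x acc) []
    rw [hbefore]
  rw [hlex]
  apply PySem.List.sorted_eq_of_perm_of_pairwise_lt _ _ _ hperm
  exact hpw.imp (fun {a b} hab => by
    rw [Prod.Lex.toLex_lt_toLex]
    exact hab)


-- ===== VERDICT (by name: the statement is the Claim_ definition above) =====
theorem diversity_sampling_py_spec : Claim_equal_diversity_sampling_py := by
  intro pool b hD
  unfold Spec_diversity_sampling_py
  by_cases hb : b ≤ 0
  · simp [diversity_sampling_py, diversity_sampling_py_alt, hb]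
  · simp only [diversity_sampling_py, diversity_sampling_py_alt, if_neg hb]
    have hInv0 := pv_inv_zero pool
    have hnd0 : (pvBucketsA pool).keys.Nodup := hInv0.1
    set d0 := pvBucketsA pool with hd0
    set fuel := (d0.values.map List.length).sum + d0.size + 1 with hfuel
    have hmu : pvMu d0 ≤ fuel := by
      unfold pvMu
      omega
    rw [pv_whileA_eq fuel d0 [] b hnd0 hmu]
    obtain ⟨L, hRR, hperm, hpw, _⟩ := pv_RR_spec fuel pool 0 d0 hInv0 hmu
    have hfil : (pvDec pool).filter (fun t => decide ((0 : Int) ≤ t.1)) = pvDec pool := by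
      apply List.filter_eq_self.mpr
      intro t ht
      have h0 := pv_go_rank_lb pool (fun _ => 0) t ht
      simpa using h0
    simp only [Nat.cast_zero] at hperm
    rw [hfil] at hperm
    rw [pv_fold_alt pool PySem.Dict.empty []]
    have hseen : (fun k => (PySem.Dict.empty : PySem.Dict Int Int).getD k 0) = (fun _ => (0 : Int)) := by
      funext k
      simp [PySem.Dict.getD, PySem.Dict.get?_empty]
    rw [hseen]
    have hdec : pvGo pool (fun _ => (0 : Int)) = pvDec pool := rfl
    simp only [List.nil_append]
    rw [hdec, pv_sorted2_eq (pvDec pool) L hperm hpw,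
      PySem.List.slice_to _ (by omega : (0 : Int) ≤ b), hRR, List.map_take]
    simp
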